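-- pv_equiv track=rewrite | github.com/xenosoz/necodong-five.2018 | bots/zero-killer.py | find_soln
-- ===== SOURCE A (Python) =====
-- def round_score(x, y):
--     '''15.1 micro secs / 36 calls'''
--     key = 1338084758805431740929
--     return ((key >> (x*12 + y*2)) & 0x3) - 1
--
-- def find_soln(y_gene, x_score, y_score):
--     good_score = float('-inf')
--     good_genes = []
--
--     for x_gene in range(720):
--         xx, x_hand = x_gene, [0, 1, 2, 3, 4, 5]
--         yy, y_hand = y_gene, [0, 1, 2, 3, 4, 5]
--         x_score = 0
--
--         for n in range(6, 0, -1):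
--             x_idx, xx = xx%n, xx//n
--             y_idx, yy = yy%n, yy//n
--             x = x_hand[x_idx]
--             y = y_hand[y_idx]
--             del x_hand[x_idx]
--             del y_hand[y_idx]
--
--             rs = round_score(x, y)
--             x_score += rs
--
--         if x_score > good_score:
--             good_genes = []
--             good_score = x_score
--
--         if x_score == good_score:
--             good_genes.append(x_gene)
--
--     return good_genes
-- ===== SOURCE B (Python) =====
-- def round_score(x, y):
--     '''15.1 micro secs / 36 calls'''
--     key = 1338084758805431740929
--     return ((key >> (x*12 + y*2)) & 0x3) - 1
--
-- def fill(x_hand, ys, g, s, m, scores):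
--     # Depth-first over the remaining-hand choices; g is the gene encoded from
--     # the choice path (digit weights 1, 6, 30, 120, 360), s the running score.
--     if not ys:
--         scores[g] = s
--         return scores
--     y, rest = ys[0], ys[1:]
--     n = len(x_hand)
--     for idx in range(n):
--         scores = fill(x_hand[:idx] + x_hand[idx+1:], rest, g + idx * m,
--                       s + round_score(x_hand[idx], y), m * n, scores)
--     return scores
--
-- def find_soln(y_gene, x_score, y_score):
--     # Decode the opponent permutation once.
--     yy, y_hand = y_gene, [0, 1, 2, 3, 4, 5]
--     y_vals = []
--     for n in range(6, 0, -1):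
--         y_vals.append(y_hand.pop(yy % n))
--         yy //= n
--     # Recursively enumerate x assignments, encoding each gene from its path.
--     scores = fill([0, 1, 2, 3, 4, 5], y_vals, 0, 0, 1, [0] * 720)
--     best = max(scores)
--     return [i for i, s in enumerate(scores) if s == best]
-- ===== Notes on version B (the rewrite author's own statement) =====
-- stated objective: alternative
-- what changed: B replaces A's 720-iteration loop of Lehmer-decoding each x_gene (interleaved with re-decoding y every time) by a recursive depth-first enumeration of the remaining-hand choices that encodes each gene from its choice path while filling a 720-entry score table (y decoded once up front), then takes max and filters ties.
import Mathlib
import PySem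

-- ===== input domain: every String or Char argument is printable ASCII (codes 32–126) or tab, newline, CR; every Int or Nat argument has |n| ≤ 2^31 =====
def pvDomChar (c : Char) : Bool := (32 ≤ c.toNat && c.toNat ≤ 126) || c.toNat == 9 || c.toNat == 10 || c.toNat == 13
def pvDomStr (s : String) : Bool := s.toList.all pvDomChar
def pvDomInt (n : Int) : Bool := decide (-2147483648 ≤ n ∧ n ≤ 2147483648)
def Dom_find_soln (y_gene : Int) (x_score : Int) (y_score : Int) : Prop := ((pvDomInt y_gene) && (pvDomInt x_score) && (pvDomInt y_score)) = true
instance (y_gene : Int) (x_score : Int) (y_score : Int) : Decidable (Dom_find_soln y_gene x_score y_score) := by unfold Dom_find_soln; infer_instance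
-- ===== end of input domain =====

-- B replaces A's per-gene Lehmer decode by a recursive depth-first enumeration of the remaining-hand
-- choices that ENCODES each gene from its choice path while filling a 720-entry score table (y is
-- decoded once), then takes max and filters ties (objective: alternative).

-- ===== PORT A =====
-- shared by both ports (identical helper in both Pythons); the shift is exact because the
-- arguments are always hand values 0..5, so x*12 + y*2 ≥ 0
def round_score (x y : Int) : Int :=
  ((((1338084758805431740929 : Nat) >>> (x * 12 + y * 2).toNat) &&& 3 : Nat) : Int) - 1

-- one iteration of A's inner `for n in range(6, 0, -1)` loop; state (xx, x_hand, yy, y_hand, x_score);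
-- `hand[idx]` ported as pyGet? with default (the index is always in range: |hand| = n), `del` as eraseIdx
def stepA (s : Int × List Int × Int × List Int × Int) (n : Int) :
    Int × List Int × Int × List Int × Int :=
  let x_idx := PySem.Int.mod s.1 n
  let y_idx := PySem.Int.mod s.2.2.1 n
  let x := (PySem.List.pyGet? s.2.1 x_idx).getD 0
  let y := (PySem.List.pyGet? s.2.2.2.1 y_idx).getD 0
  (PySem.Int.floordiv s.1 n, s.2.1.eraseIdx x_idx.toNat,
   PySem.Int.floordiv s.2.2.1 n, s.2.2.2.1.eraseIdx y_idx.toNat,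
   s.2.2.2.2 + round_score x y)

-- A's inner loop: x_score accumulated for one x_gene
def geneScoreA (x_gene y_gene : Int) : Int :=
  ((PySem.List.pyRange 6 0 (-1)).foldl stepA
    (x_gene, [0, 1, 2, 3, 4, 5], y_gene, [0, 1, 2, 3, 4, 5], 0)).2.2.2.2

-- A's outer-loop body; good_score : Option Int with none = float('-inf')
def selStep (f : Int → Int) (st : Option Int × List Int) (x_gene : Int) : Option Int × List Int :=
  let x_sc := f x_gene
  let st' := match st.1 with
    | none => ((some x_sc : Option Int), ([] : List Int))
    | some gd => if gd < x_sc then ((some x_sc : Option Int), ([] : List Int)) else st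
  (st'.1, if st'.1 = some x_sc then st'.2 ++ [x_gene] else st'.2)

def find_soln (y_gene : Int) (x_score : Int) (y_score : Int) : List Int :=
  ((PySem.List.pyRange 0 720 1).foldl (selStep (fun g => geneScoreA g y_gene)) (none, [])).2

-- ===== PORT B =====
-- one iteration of B's y-decode loop; state (yy, y_hand, y_vals); `.pop(i)` ported as pyGet? (index
-- always in range: |hand| = n) + eraseIdx
def stepY (s : Int × List Int × List Int) (n : Int) : Int × List Int × List Int :=
  let i := PySem.Int.mod s.1 n
  (PySem.Int.floordiv s.1 n, s.2.1.eraseIdx i.toNat,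
   s.2.2 ++ [(PySem.List.pyGet? s.2.1 i).getD 0])

def yDecode (y_gene : Int) : List Int :=
  ((PySem.List.pyRange 6 0 (-1)).foldl stepY (y_gene, [0, 1, 2, 3, 4, 5], [])).2.2

-- B's recursive depth-first fill: g is the gene encoded from the choice path, s the running score;
-- `scores[g] = s` ported as List.set (g is nonnegative and < len(scores) on every reachable call),
-- `x_hand[:idx]+x_hand[idx+1:]` as eraseIdx, `x_hand[idx]` as pyGet? (idx always in range)
def fillB (x_hand ys : List Int) (g s m : Int) (scores : List Int) : List Int :=
  match ys with
  | [] => scores.set g.toNat s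
  | y :: rest =>
    (PySem.List.pyRange 0 (x_hand.length : Int) 1).foldl
      (fun sc idx =>
        fillB (x_hand.eraseIdx idx.toNat) rest (g + idx * m)
          (s + round_score ((PySem.List.pyGet? x_hand idx).getD 0) y)
          (m * (x_hand.length : Int)) sc)
      scores
termination_by ys.length
decreasing_by simp

def find_soln_alt (y_gene : Int) (x_score : Int) (y_score : Int) : List Int :=
  let y_vals := yDecode y_gene
  let scores := fillB [0, 1, 2, 3, 4, 5] y_vals 0 0 1 (List.replicate 720 0)
  -- max(scores): scores has 720 entries, never empty
  let best := (PySem.List.max? scores (fun v => v)).getD 0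
  ((PySem.List.enumerate scores 0).filter (fun p => p.2 == best)).map (fun p => p.1)

-- ===== PRECONDITION & SPEC =====
def Spec_find_soln (y_gene : Int) (x_score : Int) (y_score : Int) (out : List Int) : Prop := out = find_soln_alt y_gene x_score y_score
instance (y_gene : Int) (x_score : Int) (y_score : Int) (out : List Int) : Decidable (Spec_find_soln y_gene x_score y_score out) := by unfold Spec_find_soln; infer_instance

-- ===== CLAIM (what is proved, stated in full; the proofs are below) =====
def Claim_equal_find_soln : Prop := ∀ (y_gene : Int) (x_score : Int) (y_score : Int), Dom_find_soln y_gene x_score y_score → Spec_find_soln y_gene x_score y_score (find_soln y_gene x_score y_score)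

-- ===== LEMMAS AND PROOFS =====

-- proof-only helper: one round of decode-and-score against an already decoded y value;
-- state (xx, x_hand, total)
def stepX (s : Int × List Int × Int) (y : Int) : Int × List Int × Int :=
  let n : Int := s.2.1.length
  let i := PySem.Int.mod s.1 n
  (PySem.Int.floordiv s.1 n, s.2.1.eraseIdx i.toNat,
   s.2.2 + round_score ((PySem.List.pyGet? s.2.1 i).getD 0) y)

-- the score of code c on hand xh against the decoded y values ys, starting from s
def decScore (c : Int) (xh ys : List Int) (s : Int) : Int :=
  (ys.foldl stepX (c, xh, s)).2.2

-- the countdown list [k, k-1, …, 1]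
def descL : Nat → List Int
  | 0 => []
  | k + 1 => ((k + 1 : Nat) : Int) :: descL k

theorem descL_six : PySem.List.pyRange 6 0 (-1) = descL 6 := by decide

-- the y-decode fold only appends to its vals component
theorem stepY_vals (ns : List Int) : ∀ (yy : Int) (yh : List Int) (vs : List Int),
    ns.foldl stepY (yy, yh, vs)
      = ((ns.foldl stepY (yy, yh, [])).1, (ns.foldl stepY (yy, yh, [])).2.1,
         vs ++ (ns.foldl stepY (yy, yh, [])).2.2) := by
  induction ns with
  | nil => intro yy yh vs; simp
  | cons n ns ih =>
    intro yy yh vs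
    simp only [List.foldl_cons, stepY]
    rw [ih _ _ (vs ++ [(PySem.List.pyGet? yh (PySem.Int.mod yy n)).getD 0]),
        ih _ _ ([] ++ [(PySem.List.pyGet? yh (PySem.Int.mod yy n)).getD 0])]
    simp

-- interleaved decode+score (A) = decode once, then score, for hands of matching length
theorem score_eq (k : Nat) : ∀ (xx yy acc : Int) (xh yh : List Int),
    xh.length = k → yh.length = k →
    ((descL k).foldl stepA (xx, xh, yy, yh, acc)).2.2.2.2
      = ((((descL k).foldl stepY (yy, yh, ([] : List Int))).2.2).foldl stepX (xx, xh, acc)).2.2 := by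
  induction k with
  | zero => intro xx yy acc xh yh hx hy; simp [descL]
  | succ k ih =>
    intro xx yy acc xh yh hx hy
    have hn : (0 : Int) < ((k + 1 : Nat) : Int) := by exact_mod_cast Nat.succ_pos k
    have hxm := PySem.Int.mod_nonneg xx hn
    have hxm' := PySem.Int.mod_lt xx hn
    have hym := PySem.Int.mod_nonneg yy hn
    have hym' := PySem.Int.mod_lt yy hn
    have hxt : (PySem.Int.mod xx ((k + 1 : Nat) : Int)).toNat < xh.length := by omega
    have hyt : (PySem.Int.mod yy ((k + 1 : Nat) : Int)).toNat < yh.length := by omega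
    simp only [descL, List.foldl_cons, stepA, stepY]
    rw [stepY_vals]
    simp only [List.nil_append]
    rw [ih _ _ _ _ _ (by rw [List.length_eraseIdx_of_lt hxt]; omega)
          (by rw [List.length_eraseIdx_of_lt hyt]; omega)]
    simp [stepX, hx]

theorem geneScore_eq (g y : Int) : geneScoreA g y = decScore g [0, 1, 2, 3, 4, 5] (yDecode y) 0 := by
  unfold geneScoreA decScore yDecode
  rw [descL_six]
  exact score_eq 6 g y 0 _ _ rfl rfl

theorem yDecode_length (y : Int) : (yDecode y).length = 6 := by
  unfold yDecode
  rw [descL_six]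
  simp [descL, stepY]

-- fillB preserves the length of the score table
theorem fillB_len (ys : List Int) : ∀ (xh : List Int) (g s m : Int) (sc : List Int),
    (fillB xh ys g s m sc).length = sc.length := by
  induction ys with
  | nil => intro xh g s m sc; simp [fillB]
  | cons y rest ih =>
    intro xh g s m sc
    rw [fillB]
    generalize PySem.List.pyRange 0 (xh.length : Int) 1 = L
    induction L generalizing sc with
    | nil => rfl
    | cons i L ihL => simp only [List.foldl_cons]; rw [ihL, ih]

-- frame: a fill whose write positions g + m·c (0 ≤ c < |ys|!) all avoid j leaves slot j unchanged
theorem fillB_frame (ys : List Int) : ∀ (xh : List Int) (g s m : Int) (sc : List Int) (j : Nat),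
    xh.length = ys.length → 0 < m → 0 ≤ g →
    (∀ c : Int, 0 ≤ c → c < ((Nat.factorial ys.length : Nat) : Int) → (j : Int) ≠ g + m * c) →
    (fillB xh ys g s m sc)[j]? = sc[j]? := by
  induction ys with
  | nil =>
    intro xh g s m sc j _ _ hg h
    have hj : (j : Int) ≠ g := by
      simpa using h 0 le_rfl (by norm_num [Nat.factorial])
    have : g.toNat ≠ j := by omega
    simp [fillB, List.getElem?_set_ne this]
  | cons y rest ih =>
    intro xh g s m sc j hlen hm hg h
    rw [fillB]
    simp only [List.length_cons] at h
    have hn1 : xh.length = rest.length + 1 := by simpa using hlen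
    have hmem : ∀ i ∈ PySem.List.pyRange 0 (xh.length : Int) 1, 0 ≤ i ∧ i < (xh.length : Int) := by
      intro i hi
      have := (PySem.List.mem_pyRange_one).1 hi
      exact this
    generalize hL : PySem.List.pyRange 0 (xh.length : Int) 1 = L at hmem
    clear hL
    induction L generalizing sc with
    | nil => rfl
    | cons i L ihL =>
      have hi := hmem i (by simp)
      simp only [List.foldl_cons]
      rw [ihL _ (fun i' hi' => hmem i' (List.mem_cons_of_mem _ hi'))]
      apply ih
      · rw [List.length_eraseIdx_of_lt (by omega)]; omega
      · have : (0 : Int) < (xh.length : Int) := by exact_mod_cast (by omega : 0 < xh.length)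
        positivity
      · nlinarith [hi.1, hi.2]
      · intro c' hc0 hc1 heq
        apply h (i + (xh.length : Int) * c') (by nlinarith [hi.1])
        · have hfs : ((Nat.factorial (rest.length + 1) : Nat) : Int)
              = (xh.length : Int) * ((Nat.factorial rest.length : Nat) : Int) := by
            rw [Nat.factorial_succ]; push_cast [hn1]; ring
          rw [hfs]
          nlinarith [hi.1, hi.2, hc0, hc1]
        · rw [heq]; ring

-- the value written at position g + m·c is the decode-and-score of code c
theorem fillB_get (ys : List Int) : ∀ (xh : List Int) (g s m : Int) (sc : List Int) (c : Int),
    xh.length = ys.length → 0 < m → 0 ≤ g → 0 ≤ c →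
    c < ((Nat.factorial ys.length : Nat) : Int) → (g + m * c).toNat < sc.length →
    (fillB xh ys g s m sc)[(g + m * c).toNat]? = some (decScore c xh ys s) := by
  induction ys with
  | nil =>
    intro xh g s m sc c _ _ hg hc0 hc1 hlt
    have hc : c = 0 := by
      have : c < 1 := by simpa [Nat.factorial] using hc1
      omega
    subst hc
    simp only [mul_zero, add_zero] at hlt ⊢
    simp [fillB, decScore, List.getElem?_set_self hlt]
  | cons y rest ih =>
    intro xh g s m sc c hlen hm hg hc0 hc1 hlt
    rw [fillB]
    simp only [List.length_cons] at hc1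
    have hn1 : xh.length = rest.length + 1 := by simpa using hlen
    have hnpos : (0 : Int) < (xh.length : Int) := by exact_mod_cast (by omega : 0 < xh.length)
    set n : Int := (xh.length : Int) with hn
    set i := PySem.Int.mod c n with hi
    set c' := PySem.Int.floordiv c n with hc'
    have hi0 : 0 ≤ i := PySem.Int.mod_nonneg c hnpos
    have hi1 : i < n := PySem.Int.mod_lt c hnpos
    have hdec : c' * n + i = c := PySem.Int.floordiv_mul_add_mod c n
    have hfs : ((Nat.factorial (rest.length + 1) : Nat) : Int)
        = n * ((Nat.factorial rest.length : Nat) : Int) := by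
      rw [Nat.factorial_succ]; push_cast [hn, hn1]; ring
    rw [hfs] at hc1
    have hc'0 : 0 ≤ c' := by
      have h1 : 0 ≤ i := hi0
      nlinarith [hdec, hi1]
    have hc'1 : c' < ((Nat.factorial rest.length : Nat) : Int) := by
      nlinarith [hdec, hi0, hi1]
    -- split the index range at i
    have hsplit : PySem.List.pyRange 0 n 1
        = PySem.List.pyRange 0 i 1 ++ (i :: PySem.List.pyRange (i + 1) n 1) := by
      rw [PySem.List.pyRange_one_append 0 i n hi0 (le_of_lt hi1),
          PySem.List.pyRange_one_cons hi1]
    rw [hsplit, List.foldl_append, List.foldl_cons]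
    -- the suffix calls do not touch position g + m·c
    have hframe : ∀ (L : List Int), (∀ i2 ∈ L, i < i2 ∧ i2 < n) → ∀ (sc2 : List Int),
        (L.foldl (fun sc idx =>
            fillB (xh.eraseIdx idx.toNat) rest (g + idx * m)
              (s + round_score ((PySem.List.pyGet? xh idx).getD 0) y) (m * n) sc) sc2)[(g + m * c).toNat]?
          = sc2[(g + m * c).toNat]? := by
      intro L hLmem
      induction L with
      | nil => intro sc2; rfl
      | cons i2 L ihL =>
        intro sc2
        have hi2 := hLmem i2 (by simp)
        simp only [List.foldl_cons]
        rw [ihL (fun i' hi' => hLmem i' (by simp [hi']))]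
        apply fillB_frame
        · rw [List.length_eraseIdx_of_lt (by omega)]; omega
        · positivity
        · nlinarith [hi2.1, hi2.2]
        · intro c'' hc''0 hc''1 heq
          -- position equality would force i2 = c mod n = i, contradiction
          have hjc : ((g + m * c).toNat : Int) = g + m * c := by
            have : 0 ≤ g + m * c := by nlinarith
            omega
          rw [hjc] at heq
          have hceq : c = i2 + n * c'' := by nlinarith [heq]
          have : PySem.Int.mod c n = i2 := by
            rw [hceq, PySem.Int.mod_eq_emod_of_pos hnpos, Int.add_mul_emod_self_left,
                Int.emod_eq_of_lt (by omega) hi2.2]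
          omega
    rw [hframe _ (fun i2 hi2 => by
          have := (PySem.List.mem_pyRange_one).1 hi2; omega)]
    -- the middle call writes exactly decScore
    have hidx : g + m * c = (g + i * m) + (m * n) * c' := by nlinarith [hdec]
    rw [hidx]
    have hlen1 : ∀ (sc0 : List Int), ((PySem.List.pyRange 0 i 1).foldl (fun sc idx =>
        fillB (xh.eraseIdx idx.toNat) rest (g + idx * m)
          (s + round_score ((PySem.List.pyGet? xh idx).getD 0) y) (m * n) sc) sc0).length
        = sc0.length := by
      generalize PySem.List.pyRange 0 i 1 = L
      induction L with
      | nil => intro sc0; rfl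
      | cons i0 L ihL => intro sc0; simp only [List.foldl_cons]; rw [ihL, fillB_len]
    rw [ih _ _ _ _ _ _ (by rw [List.length_eraseIdx_of_lt (by omega)]; omega)
          (by positivity) (by nlinarith) hc'0 hc'1 (by rw [hlen1]; rw [← hidx]; exact hlt)]
    -- decScore c on y :: rest takes exactly this first step
    have : decScore c xh (y :: rest) s
        = decScore c' (xh.eraseIdx i.toNat) rest
            (s + round_score ((PySem.List.pyGet? xh i).getD 0) y) := by
      simp only [decScore, List.foldl_cons, stepX, hn, hi, hc']
    rw [this]

-- the filled table is exactly A's score table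
theorem fillB_scores (y_gene : Int) :
    fillB [0, 1, 2, 3, 4, 5] (yDecode y_gene) 0 0 1 (List.replicate 720 0)
      = (PySem.List.pyRange 0 720 1).map (fun g => geneScoreA g y_gene) := by
  apply List.ext_getElem?
  intro j
  by_cases hj : j < 720
  · have hfact : ((Nat.factorial (yDecode y_gene).length : Nat) : Int) = 720 := by
      rw [yDecode_length]; norm_num [Nat.factorial]
    have hidx : ((0 : Int) + 1 * (j : Int)).toNat = j := by omega
    have hL := fillB_get (yDecode y_gene) [0, 1, 2, 3, 4, 5] 0 0 1 (List.replicate 720 0)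
      (j : Int) (by rw [yDecode_length]; rfl) one_pos le_rfl (by omega)
      (by rw [hfact]; exact_mod_cast hj) (by rw [hidx, List.length_replicate]; exact hj)
    rw [hidx] at hL
    have h720 : (((720 : Int) - 0)).toNat = 720 := by decide
    rw [hL, PySem.List.pyRange_one, h720, List.getElem?_map, List.getElem?_map,
        List.getElem?_range hj]
    simp [geneScore_eq]
  · have h1 : (fillB [0, 1, 2, 3, 4, 5] (yDecode y_gene) 0 0 1 (List.replicate 720 0)).length ≤ j := by
      rw [fillB_len, List.length_replicate]; omega
    have h2 : ((PySem.List.pyRange 0 720 1).map (fun g => geneScoreA g y_gene)).length ≤ j := by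
      rw [List.length_map, PySem.List.length_pyRange_one]; omega
    rw [List.getElem?_eq_none h1, List.getElem?_eq_none h2]

-- seed is below the running maximum
theorem le_foldl_maxf (f : Int → Int) (l : List Int) : ∀ b : Int,
    b ≤ l.foldl (fun m g => max m (f g)) b := by
  induction l with
  | nil => intro b; simp
  | cons g l ih =>
    intro b
    simp only [List.foldl_cons]
    exact le_trans (le_max_left b (f g)) (ih (max b (f g)))

-- A's streaming running-maximum with flush-on-improvement = max + filter
theorem sel_fold (f : Int → Int) (l : List Int) : ∀ (b : Int) (gs : List Int),
    l.foldl (selStep f) (some b, gs)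
      = (some (l.foldl (fun m g => max m (f g)) b),
         (if b = l.foldl (fun m g => max m (f g)) b then gs else [])
           ++ l.filter (fun g => f g == l.foldl (fun m g => max m (f g)) b)) := by
  induction l with
  | nil => intro b gs; simp
  | cons g l ih =>
    intro b gs
    have hle : ∀ c : Int, c ≤ l.foldl (fun m g => max m (f g)) c := le_foldl_maxf f l
    simp only [List.foldl_cons, List.filter_cons]
    rcases lt_trichotomy b (f g) with h | h | h
    · have hmax : max b (f g) = f g := max_eq_right h.le
      have hstep : selStep f (some b, gs) g = (some (f g), [g]) := by
        simp [selStep, h]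
      rw [hstep, ih]
      simp only [hmax]
      set MM := l.foldl (fun m g => max m (f g)) (f g) with hMM
      have hbM : ¬ b = MM := by have := hle (f g); omega
      rw [if_neg hbM]
      by_cases hM : f g = MM
      · rw [if_pos hM, if_pos (by simp [hM])]
        simp
      · rw [if_neg hM, if_neg (by simp [hM])]
    · have hstep : selStep f (some b, gs) g = (some b, gs ++ [g]) := by
        simp [selStep, h]
      have hmax : max b (f g) = b := by omega
      rw [hstep, ih]
      simp only [hmax]
      set MM := l.foldl (fun m g => max m (f g)) b with hMM
      by_cases hM : b = MM
      · rw [if_pos hM, if_pos hM, if_pos (by simp [← h, hM])]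
        simp
      · rw [if_neg hM, if_neg hM, if_neg (by simp [← h, hM])]
    · have hmax : max b (f g) = b := max_eq_left h.le
      have hne2 : ¬ b = f g := by omega
      have hstep : selStep f (some b, gs) g = (some b, gs) := by
        simp [selStep, not_lt.mpr h.le, hne2]
      rw [hstep, ih]
      simp only [hmax]
      set MM := l.foldl (fun m g => max m (f g)) b with hMM
      have hgM : ¬ f g = MM := by have := hle b; omega
      simp [hgM]

-- enumerate-of-map over a contiguous index range filters back to the indices themselves
theorem enum_range_filter (f : Int → Int) (M : Int) :
    ∀ (l : List Int) (s : Int), l = PySem.List.pyRange s (s + l.length) 1 →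
    ((PySem.List.enumerate (l.map f) s).filter (fun p => p.2 == M)).map (fun p => p.1)
      = l.filter (fun g => f g == M) := by
  intro l
  induction l with
  | nil => intro s _; simp
  | cons x l ih =>
    intro s hl
    have hlt : s < s + (((x :: l).length : Nat) : Int) := by
      have h0 : 0 < (x :: l).length := Nat.succ_pos _
      omega
    rw [PySem.List.pyRange_one_cons hlt] at hl
    injection hl with hx hrest0
    subst hx
    have hcast : x + (((x :: l).length : Nat) : Int) = (x + 1) + (l.length : Int) := by
      push_cast [List.length_cons]; ring
    have hrest : l = PySem.List.pyRange (x + 1) ((x + 1) + (l.length : Int)) 1 := by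
      rw [hcast] at hrest0; exact hrest0
    simp only [List.map_cons, PySem.List.enumerate_cons, List.filter_cons]
    by_cases hM : (f x == M) = true
    · simp [hM, ih (x + 1) hrest]
    · simp [hM, ih (x + 1) hrest]

-- ===== VERDICT (by name: the statement is the Claim_ definition above) =====
theorem find_soln_spec : Claim_equal_find_soln := by
  intro y_gene x_score y_score _
  simp only [Spec_find_soln, find_soln, find_soln_alt]
  set f := fun g => geneScoreA g y_gene with hfdef
  rw [fillB_scores y_gene]
  have hcons : PySem.List.pyRange 0 720 1 = (0 : Int) :: PySem.List.pyRange 1 720 1 :=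
    PySem.List.pyRange_one_cons (by norm_num)
  rw [enum_range_filter f _ (PySem.List.pyRange 0 720 1) 0
        (by rw [PySem.List.length_pyRange_one]; norm_num)]
  rw [hcons, List.map_cons, PySem.List.max?_id_cons, List.foldl_map, Option.getD_some,
      List.foldl_cons]
  have hstep0 : selStep f (none, ([] : List Int)) 0 = (some (f 0), [0]) := by
    simp [selStep]
  rw [hstep0, sel_fold f (PySem.List.pyRange 1 720 1) (f 0) [0], List.filter_cons]
  set M := (PySem.List.pyRange 1 720 1).foldl (fun m g => max m (f g)) (f 0) with hMdef
  by_cases h0 : f 0 = M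
  · simp [h0]
  · simp [h0]
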